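-- pv_equiv track=rewrite | github.com/Waterbootdev/abstract-puzzle-generator | generate_functions.py | generate_frame_index
-- ===== SOURCE A (Python) =====
-- def generate_frame_index(rotated:list[bool]):
--     frame_index = 0
--     rotation_index = 0
--     frame_indexes = []
--     rotation_indexes = []
--
--     for rotate in rotated:
--         current_frame_index = frame_index
--         current_rotation_index = rotation_index
--
--         if rotate:
--             if rotation_index < 3:
--                 rotation_index += 1
--             else:
--                 rotation_index = 0
--                 frame_index += 1
--
--         frame_indexes.append(current_frame_index)
--         rotation_indexes.append(current_rotation_index)
--
--     return frame_indexes, rotation_indexes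
-- ===== SOURCE B (Python) =====
-- def generate_frame_index(rotated: list[bool]):
--     # Two staged passes: collect the positions of rotation flags, then emit
--     # run-length blocks of constant (frame, rotation) indices between them.
--     boundaries = [i for i, r in enumerate(rotated) if r]
--     frame_indexes = []
--     rotation_indexes = []
--     prev = 0
--     for k, pos in enumerate(boundaries):
--         run = pos + 1 - prev
--         frame_indexes += [k // 4] * run
--         rotation_indexes += [k % 4] * run
--         prev = pos + 1
--     m = len(boundaries)
--     run = len(rotated) - prev
--     frame_indexes += [m // 4] * run
--     rotation_indexes += [m % 4] * run
--     return frame_indexes, rotation_indexes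
-- ===== Notes on version B (the rewrite author's own statement) =====
-- stated objective: alternative
-- what changed: Replaces A's per-element reset-at-3 state machine by two staged passes: first collect the positions of the rotation flags, then emit run-length blocks of constant frame/rotation indices between consecutive flag positions.
import Mathlib
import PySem

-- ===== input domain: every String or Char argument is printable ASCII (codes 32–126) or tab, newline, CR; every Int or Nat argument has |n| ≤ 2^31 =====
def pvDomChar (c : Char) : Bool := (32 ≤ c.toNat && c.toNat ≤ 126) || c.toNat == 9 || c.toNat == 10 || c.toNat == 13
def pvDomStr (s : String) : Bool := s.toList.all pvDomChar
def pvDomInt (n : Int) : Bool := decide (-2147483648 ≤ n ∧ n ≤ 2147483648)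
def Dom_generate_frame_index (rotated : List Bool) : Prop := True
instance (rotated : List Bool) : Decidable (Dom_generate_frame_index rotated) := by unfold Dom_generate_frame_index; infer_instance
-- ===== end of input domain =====

-- B replaces A's per-element reset-at-3 state machine by two staged passes: collect the positions of rotation flags, then emit run-length blocks of constant indices between them (objective: alternative; same O(n) cost).


-- ===== PORT A =====
-- Port of A: loop state (frame_index, rotation_index); branchy reset-at-3 state machine.
def pvGoA (fi ri : Int) : List Bool → List Int × List Int
  | [] => ([], [])
  | r :: rest =>
    let st := if r then (if ri < 3 then (fi, ri + 1) else (fi + 1, 0)) else (fi, ri)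
    let rec_ := pvGoA st.1 st.2 rest
    (fi :: rec_.1, ri :: rec_.2)

def generate_frame_index (rotated : List Bool) : List Int × List Int :=
  pvGoA 0 0 rotated

-- ===== PORT B =====
-- Port of B: boundaries = [i for i, r in enumerate(rotated) if r]
def pvBoundaries (rotated : List Bool) : List Int :=
  ((PySem.List.enumerate rotated).filter (fun p => p.2)).map (fun p => p.1)

-- Port of B's loop over enumerate(boundaries): state (prev, frame_indexes, rotation_indexes), k = enumerate index.
-- [x] * run with possibly negative run is List.replicate run.toNat (Python's * clamps negatives to empty, as toNat does).
def pvSegLoop (k prev : Int) (f ro : List Int) : List Int → Int × List Int × List Int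
  | [] => (prev, f, ro)
  | pos :: rest =>
    let run := (pos + 1 - prev).toNat
    pvSegLoop (k + 1) (pos + 1)
      (f ++ List.replicate run (PySem.Int.floordiv k 4))
      (ro ++ List.replicate run (PySem.Int.mod k 4)) rest

def generate_frame_index_alt (rotated : List Bool) : List Int × List Int :=
  let boundaries := pvBoundaries rotated
  let st := pvSegLoop 0 0 [] [] boundaries
  let m : Int := boundaries.length
  let run := ((rotated.length : Int) - st.1).toNat
  (st.2.1 ++ List.replicate run (PySem.Int.floordiv m 4),
   st.2.2 ++ List.replicate run (PySem.Int.mod m 4))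

-- ===== PRECONDITION & SPEC =====
def Spec_generate_frame_index (rotated : List Bool) (out : List Int × List Int) : Prop := out = generate_frame_index_alt rotated
instance (rotated : List Bool) (out : List Int × List Int) : Decidable (Spec_generate_frame_index rotated out) := by unfold Spec_generate_frame_index; infer_instance

-- ===== CLAIM (what is proved, stated in full; the proofs are below) =====
def Claim_equal_generate_frame_index : Prop := ∀ (rotated : List Bool), Dom_generate_frame_index rotated → Spec_generate_frame_index rotated (generate_frame_index rotated)

-- ===== LEMMAS AND PROOFS =====

-- prefix counts of rotation flags: element i of countsFrom c l is c + #true in l.take i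
def countsFrom (c : Int) : List Bool → List Int
  | [] => []
  | r :: rest => c :: countsFrom (if r then c + 1 else c) rest

-- the single-counter per-element loop, a stepping stone between the two ports
def pvCnt (count : Int) : List Bool → List Int × List Int
  | [] => ([], [])
  | r :: rest =>
    let rec_ := pvCnt (if r then count + 1 else count) rest
    (PySem.Int.floordiv count 4 :: rec_.1, PySem.Int.mod count 4 :: rec_.2)

def pvMaps (c : Int) (l : List Bool) : List Int × List Int :=
  ((countsFrom c l).map (fun x => PySem.Int.floordiv x 4),
   (countsFrom c l).map (fun x => PySem.Int.mod x 4))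

-- B's whole computation, generalized over the starting enumerate index / count c
def pvBcomb (c : Int) (l : List Bool) : List Int × List Int :=
  ((pvSegLoop c 0 [] [] (pvBoundaries l)).2.1 ++
     List.replicate (((l.length : Int)) - (pvSegLoop c 0 [] [] (pvBoundaries l)).1).toNat
       (PySem.Int.floordiv (c + (pvBoundaries l).length) 4),
   (pvSegLoop c 0 [] [] (pvBoundaries l)).2.2 ++
     List.replicate (((l.length : Int)) - (pvSegLoop c 0 [] [] (pvBoundaries l)).1).toNat
       (PySem.Int.mod (c + (pvBoundaries l).length) 4))

theorem pvGoA_eq_cnt (l : List Bool) : ∀ c : Int, 0 ≤ c →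
    pvGoA (PySem.Int.floordiv c 4) (PySem.Int.mod c 4) l = pvCnt c l := by
  induction l with
  | nil => intro c hc; rfl
  | cons r rest ih =>
    intro c hc
    have h4 : (0:Int) < 4 := by norm_num
    have hf := PySem.Int.floordiv_eq_ediv_of_pos (a := c) h4
    have hm := PySem.Int.mod_eq_emod_of_pos (a := c) h4
    have hf' := PySem.Int.floordiv_eq_ediv_of_pos (a := c + 1) h4
    have hm' := PySem.Int.mod_eq_emod_of_pos (a := c + 1) h4
    have hmb : 0 ≤ c % 4 ∧ c % 4 < 4 :=
      ⟨Int.emod_nonneg c (by norm_num), Int.emod_lt_of_pos c h4⟩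
    have hst : (if PySem.Int.mod c 4 < 3 then (PySem.Int.floordiv c 4, PySem.Int.mod c 4 + 1)
        else (PySem.Int.floordiv c 4 + 1, 0)) =
        (PySem.Int.floordiv (c+1) 4, PySem.Int.mod (c+1) 4) := by
      rw [hf, hm, hf', hm']
      by_cases hlt : c % 4 < 3
      · rw [if_pos hlt, Prod.mk.injEq]; exact ⟨by omega, by omega⟩
      · rw [if_neg hlt, Prod.mk.injEq]; exact ⟨by omega, by omega⟩
    cases r with
    | false =>
      simp only [pvGoA, pvCnt, if_neg (by simp : ¬ (false = true))]
      rw [ih c hc]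
    | true =>
      simp only [pvGoA, pvCnt, if_true, hst, ih (c + 1) (by omega)]

theorem pvCnt_eq_maps (l : List Bool) : ∀ c : Int, pvCnt c l = pvMaps c l := by
  induction l with
  | nil => intro c; rfl
  | cons r rest ih =>
    intro c
    simp [pvCnt, pvMaps, countsFrom, ih, pvMaps]

-- boundaries of a cons
theorem enumerate_shift {α : Type} (l : List α) : ∀ s : Int,
    PySem.List.enumerate l (s + 1) = (PySem.List.enumerate l s).map (fun p => (p.1 + 1, p.2)) := by
  induction l with
  | nil => intro s; simp [PySem.List.enumerate_nil]
  | cons x rest ih => intro s; simp [PySem.List.enumerate_cons, ih (s + 1)]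

theorem pvBoundaries_cons (r : Bool) (rest : List Bool) :
    pvBoundaries (r :: rest) =
      (if r then [(0:Int)] else []) ++ (pvBoundaries rest).map (· + 1) := by
  have h1 : PySem.List.enumerate rest (1:Int) = (PySem.List.enumerate rest 0).map (fun p => (p.1 + 1, p.2)) := by
    simpa using enumerate_shift rest 0
  unfold pvBoundaries
  rw [PySem.List.enumerate_cons]
  rw [show ((0:Int) + 1) = 1 by ring]
  rw [h1]
  cases r <;> simp [List.filter_map, List.map_map, Function.comp_def]

theorem pvBoundaries_nonneg (l : List Bool) : ∀ x ∈ pvBoundaries l, 0 ≤ x := by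
  induction l with
  | nil => intro x hx; simp [pvBoundaries, PySem.List.enumerate_nil] at hx
  | cons r rest ih =>
    intro x hx
    rw [pvBoundaries_cons] at hx
    rcases List.mem_append.mp hx with h | h
    · cases r <;> simp at h; omega
    · obtain ⟨y, hy, rfl⟩ := List.mem_map.mp h
      have := ih y hy; omega

-- accumulator generalization for the segment loop
theorem pvSegLoop_acc (bs : List Int) : ∀ (k prev : Int) (f ro : List Int),
    pvSegLoop k prev f ro bs =
      ((pvSegLoop k prev [] [] bs).1,
       f ++ (pvSegLoop k prev [] [] bs).2.1,
       ro ++ (pvSegLoop k prev [] [] bs).2.2) := by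
  induction bs with
  | nil => intro k prev f ro; simp [pvSegLoop]
  | cons pos rest ih =>
    intro k prev f ro
    simp only [pvSegLoop]
    rw [ih (k+1) (pos+1) (f ++ _) (ro ++ _), ih (k+1) (pos+1) ([] ++ _) ([] ++ _)]
    simp

-- shifting every boundary by one shifts prev by one
theorem pvSegLoop_shift (bs : List Int) : ∀ (k prev : Int) (f ro : List Int),
    pvSegLoop k prev f ro (bs.map (· + 1)) =
      ((pvSegLoop k (prev - 1) f ro bs).1 + 1,
       (pvSegLoop k (prev - 1) f ro bs).2.1,
       (pvSegLoop k (prev - 1) f ro bs).2.2) := by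
  induction bs with
  | nil => intro k prev f ro; simp [pvSegLoop]
  | cons pos rest ih =>
    intro k prev f ro
    simp only [List.map_cons, pvSegLoop]
    rw [show (pos + 1 + 1 - prev) = (pos + 1 - (prev - 1)) by ring]
    rw [ih (k+1) (pos + 1 + 1) _ _]
    rw [show (pos + 1 + 1 - 1) = pos + 1 by ring]

-- starting the loop at prev = -1 emits one extra copy of the k-block in front (nonempty, nonneg head)
theorem pvSegLoop_neg_one (pos : Int) (bs : List Int) (k : Int) (hpos : 0 ≤ pos) :
    pvSegLoop k (-1) [] [] (pos :: bs) =
      ((pvSegLoop k 0 [] [] (pos :: bs)).1,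
       PySem.Int.floordiv k 4 :: (pvSegLoop k 0 [] [] (pos :: bs)).2.1,
       PySem.Int.mod k 4 :: (pvSegLoop k 0 [] [] (pos :: bs)).2.2) := by
  simp only [pvSegLoop]
  have h1 : (pos + 1 - (-1)).toNat = (pos + 1 - 0).toNat + 1 := by omega
  rw [h1, List.replicate_succ]
  rw [pvSegLoop_acc bs (k+1) (pos+1) ([] ++ _) ([] ++ _),
      pvSegLoop_acc bs (k+1) (pos+1) ([] ++ List.replicate (pos + 1 - 0).toNat _) _]
  simp [List.replicate_succ]

theorem pvBcomb_eq_maps (l : List Bool) : ∀ c : Int, pvBcomb c l = pvMaps c l := by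
  induction l with
  | nil =>
    intro c
    simp [pvBcomb, pvBoundaries, PySem.List.enumerate_nil, pvSegLoop, pvMaps, countsFrom]
  | cons r rest ih =>
    intro c
    cases r with
    | true =>
      have hb := pvBoundaries_cons true rest
      simp only [if_true] at hb
      have hrec := ih (c + 1)
      simp only [pvBcomb, pvMaps] at hrec ⊢
      rw [hb]
      simp only [List.singleton_append, pvSegLoop]
      rw [show ((0:Int) + 1 - 0).toNat = 1 by norm_num]
      rw [pvSegLoop_acc ((pvBoundaries rest).map (· + 1)) (c + 1) (0 + 1) _ _]
      rw [show ((0:Int) + 1) = 0 + 1 by ring]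
      rw [pvSegLoop_shift (pvBoundaries rest) (c + 1) (0 + 1) [] []]
      rw [show ((0:Int) + 1 - 1) = 0 by ring]
      simp only [List.replicate_one, List.cons_append, List.nil_append, List.length_cons,
        List.length_map, countsFrom, List.map_cons, Prod.mk.injEq]
      push_cast
      simp only [Prod.mk.injEq] at hrec
      obtain ⟨hr1, hr2⟩ := hrec
      rw [show ((rest.length : Int) + 1 - ((pvSegLoop (c + 1) 0 [] [] (pvBoundaries rest)).1 + 1)) =
            (rest.length : Int) - (pvSegLoop (c + 1) 0 [] [] (pvBoundaries rest)).1 from by ring,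
          show (c + (((pvBoundaries rest).length : Int) + 1)) = c + 1 + ((pvBoundaries rest).length : Int) from by ring]
      exact ⟨by rw [hr1], by rw [hr2]⟩
    | false =>
      have hb := pvBoundaries_cons false rest
      simp only [Bool.false_eq_true, if_false] at hb
      have hrec := ih c
      simp only [pvBcomb, pvMaps] at hrec ⊢
      rw [hb, List.nil_append, pvSegLoop_shift (pvBoundaries rest) c 0 [] []]
      rw [show ((0:Int) - 1) = -1 by ring]
      cases hbs : pvBoundaries rest with
      | nil =>
        rw [hbs] at hrec
        simp only [pvSegLoop, List.nil_append, List.length_nil, List.length_cons,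
          List.map_nil, List.length_map, Nat.cast_zero, add_zero, countsFrom,
          List.map_cons, Prod.mk.injEq] at hrec ⊢
        push_cast at hrec ⊢
        obtain ⟨hr1, hr2⟩ := hrec
        constructor
        · rw [show ((rest.length : Int) + 1 - 0).toNat = ((rest.length : Int) - 0).toNat + 1 from by omega,
              List.replicate_succ, hr1]
        · rw [show ((rest.length : Int) + 1 - 0).toNat = ((rest.length : Int) - 0).toNat + 1 from by omega,
              List.replicate_succ, hr2]
      | cons pos bs' =>
        have hpos : 0 ≤ pos := pvBoundaries_nonneg rest pos (by rw [hbs]; exact List.mem_cons_self)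
        rw [hbs] at hrec
        rw [pvSegLoop_neg_one pos bs' c hpos]
        simp only [List.length_cons, List.length_map, countsFrom, List.map_cons,
          List.cons_append, Prod.mk.injEq] at hrec ⊢
        push_cast at hrec ⊢
        obtain ⟨hr1, hr2⟩ := hrec
        rw [show ((rest.length : Int) + 1 - ((pvSegLoop c 0 [] [] (pos :: bs')).1 + 1)) =
              (rest.length : Int) - (pvSegLoop c 0 [] [] (pos :: bs')).1 from by ring]
        exact ⟨by rw [hr1], by rw [hr2]⟩

theorem generate_frame_index_spec : Claim_equal_generate_frame_index := by
  intro rotated _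
  unfold Spec_generate_frame_index generate_frame_index
  have hA := pvGoA_eq_cnt rotated 0 (by norm_num)
  have h0 : PySem.Int.floordiv 0 4 = 0 := by decide
  have h0' : PySem.Int.mod 0 4 = 0 := by decide
  rw [h0, h0'] at hA
  rw [hA, pvCnt_eq_maps]
  have hB := pvBcomb_eq_maps rotated 0
  have : generate_frame_index_alt rotated = pvBcomb 0 rotated := by
    unfold generate_frame_index_alt pvBcomb
    simp
  rw [this, hB]
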